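-- pv_equiv track=rewrite | github.com/pypi-data/pypi-mirror-403 | packages/rietpy/rietpy-0.1.9.tar.gz/rietpy-0.1.9/src/rietpy/engine.py | _extract_phase_blocks
-- ===== SOURCE A (Python) =====
-- def _extract_phase_blocks(lines):
--     """
--     Extracts individual phase blocks from the header section.
--     Returns a list of lists of strings (blocks).
--     """
--     blocks = []
--     current_block = []
--     in_block = False
--
--     start_idx = -1
--     end_idx = -1
--     for i, line in enumerate(lines):
--         if "Data concerning crystalline phases" in line:
--             start_idx = i
--         if "} End of information about phases" in line:
--             end_idx = i
--
--     if start_idx == -1 or end_idx == -1: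
--         return []
--
--     for i in range(start_idx + 1, end_idx):
--         line = lines[i]
--         # Check for start of block
--         # Usually "! Phase @" or "PHNAME"
--         if "! Phase @" in line:
--             if in_block:
--                 # End previous block
--                 blocks.append(current_block)
--                 current_block = []
--             in_block = True
--             current_block.append(line)
--         elif in_block:
--             current_block.append(line)
--             # Check for end of block
--             if "# End Phase" in line:
--                 in_block = False
--                 blocks.append(current_block)
--                 current_block = []
--
--     # Handle case where last block doesn't have explicit end marker or we are inside one
--     if in_block and current_block:
--         blocks.append(current_block)
--
--     return blocks
-- ===== SOURCE B (Python) =====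
-- def _rlast_containing(lines, needle):
--     """Index of the last line containing needle, or -1 (backward scan, early return)."""
--     return next((i for i, line in reversed(list(enumerate(lines))) if needle in line), -1)
--
--
-- def _extract_phase_blocks(lines):
--     start_idx = _rlast_containing(lines, "Data concerning crystalline phases")
--     end_idx = _rlast_containing(lines, "} End of information about phases")
--     if start_idx == -1 or end_idx == -1:
--         return []
--     starts = [p for p in range(start_idx + 1, end_idx) if "! Phase @" in lines[p]]
--     blocks = []
--     for p, q in zip(starts, starts[1:] + [end_idx]):
--         j = next((i for i in range(p + 1, q) if "# End Phase" in lines[i]), None)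
--         blocks.append(lines[p:j + 1] if j is not None else lines[p:q])
--     return blocks
-- ===== Notes on version B (the rewrite author's own statement) =====
-- stated objective: alternative
-- what changed: A's single-pass toggle state machine (in_block flag, accumulating current_block line by line) is replaced by an index-and-slice decomposition: backward scans find the last marker lines, a filter collects the phase-start indices, and each block is one slice of lines up to the first '# End Phase' line or the next start/end boundary.
import Mathlib
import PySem

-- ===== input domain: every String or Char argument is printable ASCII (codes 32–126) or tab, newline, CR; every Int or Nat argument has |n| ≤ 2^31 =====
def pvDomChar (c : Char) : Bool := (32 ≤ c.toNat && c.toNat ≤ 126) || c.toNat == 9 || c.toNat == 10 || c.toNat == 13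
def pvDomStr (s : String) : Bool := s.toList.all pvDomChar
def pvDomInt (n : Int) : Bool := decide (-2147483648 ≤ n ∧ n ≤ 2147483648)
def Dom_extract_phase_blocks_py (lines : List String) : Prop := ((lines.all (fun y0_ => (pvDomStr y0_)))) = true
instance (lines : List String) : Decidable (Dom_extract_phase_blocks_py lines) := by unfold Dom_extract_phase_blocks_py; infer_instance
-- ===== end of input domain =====

-- B replaces A's one-pass toggle state machine by an index-and-slice decomposition
-- (backward scan for the last markers, then a list of phase-start indices and one
-- slice per start); objective: alternative decomposition, same cost, no speed claim.

-- ===== PORT A =====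
def isPhaseStart (s : String) : Bool := PySem.Str.isIn "! Phase @" s
def isPhaseEnd (s : String) : Bool := PySem.Str.isIn "# End Phase" s

def stepA (lines : List String) (st : List (List String) × List String × Bool) (i : Int) :
    List (List String) × List String × Bool :=
  let line := PySem.List.pyGetD lines i ""
  if isPhaseStart line then
    let st' := if st.2.2 then (st.1 ++ [st.2.1], ([] : List String)) else (st.1, st.2.1)
    (st'.1, st'.2 ++ [line], true)
  else if st.2.2 then
    let cb := st.2.1 ++ [line]
    if isPhaseEnd line then (st.1 ++ [cb], [], false) else (st.1, cb, true)
  else st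

def finishA (st : List (List String) × List String × Bool) : List (List String) :=
  if st.2.2 && !st.2.1.isEmpty then st.1 ++ [st.2.1] else st.1

def extract_phase_blocks_py (lines : List String) : List (List String) :=
  let se := (PySem.List.enumerate lines 0).foldl
    (fun (st : Int × Int) p =>
      let st1 := if PySem.Str.isIn "Data concerning crystalline phases" p.2 then (p.1, st.2) else st
      if PySem.Str.isIn "} End of information about phases" p.2 then (st1.1, p.1) else st1)
    (-1, -1)
  if se.1 = -1 ∨ se.2 = -1 then []
  else
    finishA ((PySem.List.pyRange (se.1 + 1) se.2 1).foldl (stepA lines) ([], [], false))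

-- ===== PORT B =====
def rlastContaining (lines : List String) (needle : String) : Int :=
  match (PySem.List.enumerate lines 0).reverse.find? (fun p => PySem.Str.isIn needle p.2) with
  | some p => p.1
  | none => -1

def blockOf (lines : List String) (p q : Int) : List String :=
  match (PySem.List.pyRange (p + 1) q 1).find?
      (fun i => isPhaseEnd (PySem.List.pyGetD lines i "")) with
  | some j => PySem.List.slice lines (some p) (some (j + 1))
  | none   => PySem.List.slice lines (some p) (some q)

def extract_phase_blocks_py_alt (lines : List String) : List (List String) :=
  let start_idx := rlastContaining lines "Data concerning crystalline phases"
  let end_idx := rlastContaining lines "} End of information about phases"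
  if start_idx = -1 ∨ end_idx = -1 then []
  else
    let starts := (PySem.List.pyRange (start_idx + 1) end_idx 1).filter
      (fun pp => isPhaseStart (PySem.List.pyGetD lines pp ""))
    (starts.zip (starts.drop 1 ++ [end_idx])).map (fun pq => blockOf lines pq.1 pq.2)

-- ===== PRECONDITION & SPEC =====
def Spec_extract_phase_blocks_py (lines : List String) (out : List (List String)) : Prop := out = extract_phase_blocks_py_alt lines
instance (lines : List String) (out : List (List String)) : Decidable (Spec_extract_phase_blocks_py lines out) := by unfold Spec_extract_phase_blocks_py; infer_instance

-- ===== CLAIM (what is proved, stated in full; the proofs are below) =====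
def Claim_equal_extract_phase_blocks_py : Prop := ∀ (lines : List String), Dom_extract_phase_blocks_py lines → Spec_extract_phase_blocks_py lines (extract_phase_blocks_py lines)

-- ===== LEMMAS AND PROOFS =====

-- the common reference shape: a structural recursion over the scanned index range,
-- carrying the start index of the open block (if any)
def specGo (lines : List String) (b : Int) (m : Option Int) (i : Int) : List (List String) :=
  if _h : b ≤ i then
    match m with
    | none => []
    | some p => [PySem.List.slice lines (some p) (some i)]
  else
    let line := PySem.List.pyGetD lines i ""
    match m with
    | none =>
      if isPhaseStart line then specGo lines b (some i) (i + 1)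
      else specGo lines b none (i + 1)
    | some p =>
      if isPhaseStart line then
        PySem.List.slice lines (some p) (some i) :: specGo lines b (some i) (i + 1)
      else if isPhaseEnd line then
        PySem.List.slice lines (some p) (some (i + 1)) :: specGo lines b none (i + 1)
      else specGo lines b (some p) (i + 1)
termination_by (b - i).toNat
decreasing_by all_goals omega

def startsIn (lines : List String) (b i : Int) : List Int :=
  (PySem.List.pyRange i b 1).filter (fun pp => isPhaseStart (PySem.List.pyGetD lines pp ""))

def bmap (lines : List String) (b : Int) (l : List Int) : List (List String) :=
  (l.zip (l.drop 1 ++ [b])).map (fun pq => blockOf lines pq.1 pq.2)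

-- basic slice facts
lemma pyGetD_resolve (lines : List String) (i : Int) (h0 : 0 ≤ i) (h1 : i.toNat < lines.length) :
    PySem.List.pyGetD lines i "" = lines[i.toNat] := by
  exact PySem.List.pyGetD_eq_getElem lines "" h0 (by omega)

lemma slice_singleton (lines : List String) (i : Int) (h0 : 0 ≤ i) (h1 : i.toNat < lines.length) :
    PySem.List.slice lines (some i) (some (i + 1)) = [lines[i.toNat]] := by
  rw [PySem.List.slice_toNat lines h0 (by omega)]
  have h2 : (i + 1).toNat - i.toNat = 1 := by omega
  rw [h2, List.drop_eq_getElem_cons h1]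
  rfl

lemma slice_snoc (lines : List String) (p i : Int) (h0 : 0 ≤ p) (hpi : p < i)
    (h1 : i.toNat < lines.length) :
    PySem.List.slice lines (some p) (some i) ++ [lines[i.toNat]]
      = PySem.List.slice lines (some p) (some (i + 1)) := by
  rw [PySem.List.slice_toNat lines h0 (by omega), PySem.List.slice_toNat lines h0 (by omega)]
  have h2 : (i + 1).toNat - p.toNat = (i.toNat - p.toNat) + 1 := by omega
  rw [h2, List.take_add_one]
  have h3 : (List.drop p.toNat lines)[i.toNat - p.toNat]? = some lines[i.toNat] := by
    rw [List.getElem?_drop]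
    rw [List.getElem?_eq_getElem (by omega)]
    congr 1
    congr 1
    omega
  rw [h3]
  rfl

lemma slice_ne_nil (lines : List String) (p i : Int) (h0 : 0 ≤ p) (hpi : p < i)
    (h1 : p.toNat < lines.length) :
    PySem.List.slice lines (some p) (some i) ≠ [] := by
  rw [PySem.List.slice_toNat lines h0 (by omega)]
  intro hcon
  have := congrArg List.length hcon
  simp [List.length_take, List.length_drop] at this
  omega

-- unfolding equations for specGo
lemma specGo_none_base (lines : List String) (b i : Int) (h : b ≤ i) :
    specGo lines b none i = [] := by rw [specGo]; simp [h]

lemma specGo_some_base (lines : List String) (b p i : Int) (h : b ≤ i) :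
    specGo lines b (some p) i = [PySem.List.slice lines (some p) (some i)] := by
  rw [specGo]; simp [h]

lemma specGo_none_step (lines : List String) (b i : Int) (h : i < b) :
    specGo lines b none i
      = if isPhaseStart (PySem.List.pyGetD lines i "") then specGo lines b (some i) (i + 1)
        else specGo lines b none (i + 1) := by
  conv_lhs => rw [specGo]
  rw [dif_neg (not_le.2 h)]

lemma specGo_some_step (lines : List String) (b p i : Int) (h : i < b) :
    specGo lines b (some p) i
      = if isPhaseStart (PySem.List.pyGetD lines i "") then
          PySem.List.slice lines (some p) (some i) :: specGo lines b (some i) (i + 1)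
        else if isPhaseEnd (PySem.List.pyGetD lines i "") then
          PySem.List.slice lines (some p) (some (i + 1)) :: specGo lines b none (i + 1)
        else specGo lines b (some p) (i + 1) := by
  conv_lhs => rw [specGo]
  rw [dif_neg (not_le.2 h)]

-- A's fold equals the reference recursion
lemma foldA_spec (lines : List String) (b : Int) (hb : b ≤ (lines.length : Int)) :
    ∀ n (i : Int), (b - i).toNat = n → 0 ≤ i → i ≤ b →
      ((∀ blocks, finishA ((PySem.List.pyRange i b 1).foldl (stepA lines) (blocks, [], false))
          = blocks ++ specGo lines b none i)
       ∧ (∀ blocks (p : Int), 0 ≤ p → p < i →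
          finishA ((PySem.List.pyRange i b 1).foldl (stepA lines)
              (blocks, PySem.List.slice lines (some p) (some i), true))
            = blocks ++ specGo lines b (some p) i)) := by
  intro n
  induction n with
  | zero =>
    intro i hn h0 hib
    have hbi : b ≤ i := by omega
    rw [PySem.List.pyRange_one_eq_nil hbi]
    constructor
    · intro blocks
      rw [List.foldl_nil, specGo_none_base lines b i hbi]
      simp [finishA]
    · intro blocks p hp0 hpi
      rw [List.foldl_nil, specGo_some_base lines b p i hbi]
      have hne := slice_ne_nil lines p i hp0 hpi (by omega)
      unfold finishA
      simp [hne]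
  | succ n ih =>
    intro i hn h0 hib
    have hlt : i < b := by omega
    have hIH := ih (i + 1) (by omega) (by omega) (by omega)
    have hidx : i.toNat < lines.length := by omega
    have hline := pyGetD_resolve lines i h0 hidx
    rw [PySem.List.pyRange_one_cons hlt]
    constructor
    · intro blocks
      rw [List.foldl_cons, specGo_none_step lines b i hlt]
      by_cases hPS : isPhaseStart (PySem.List.pyGetD lines i "")
      · have hstep : stepA lines (blocks, [], false) i
            = (blocks, PySem.List.slice lines (some i) (some (i + 1)), true) := by
          unfold stepA
          simp only [hPS, if_true]
          rw [slice_singleton lines i h0 hidx, hline]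
          simp
        rw [hstep, if_pos hPS]
        exact hIH.2 blocks i h0 (by omega)
      · have hstep : stepA lines (blocks, [], false) i = (blocks, [], false) := by
          unfold stepA
          simp [hPS]
        rw [hstep, if_neg hPS]
        exact hIH.1 blocks
    · intro blocks p hp0 hpi
      rw [List.foldl_cons, specGo_some_step lines b p i hlt]
      by_cases hPS : isPhaseStart (PySem.List.pyGetD lines i "")
      · have hstep : stepA lines (blocks, PySem.List.slice lines (some p) (some i), true) i
            = (blocks ++ [PySem.List.slice lines (some p) (some i)],
               PySem.List.slice lines (some i) (some (i + 1)), true) := by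
          unfold stepA
          simp only [hPS, if_true]
          rw [slice_singleton lines i h0 hidx, hline]
          simp
        rw [hstep, if_pos hPS, hIH.2 (blocks ++ [PySem.List.slice lines (some p) (some i)]) i h0 (by omega)]
        simp
      · by_cases hEM : isPhaseEnd (PySem.List.pyGetD lines i "")
        · have hstep : stepA lines (blocks, PySem.List.slice lines (some p) (some i), true) i
              = (blocks ++ [PySem.List.slice lines (some p) (some (i + 1))], [], false) := by
            unfold stepA
            simp only [hPS, if_false, Bool.false_eq_true, hEM, if_true]
            rw [hline, slice_snoc lines p i hp0 hpi hidx]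
          rw [hstep, if_neg hPS, if_pos hEM, hIH.1 (blocks ++ [PySem.List.slice lines (some p) (some (i + 1))])]
          simp
        · have hstep : stepA lines (blocks, PySem.List.slice lines (some p) (some i), true) i
              = (blocks, PySem.List.slice lines (some p) (some (i + 1)), true) := by
            unfold stepA
            simp only [hPS, if_false, Bool.false_eq_true, hEM]
            rw [hline, slice_snoc lines p i hp0 hpi hidx]
            simp
          rw [hstep, if_neg hPS, if_neg hEM]
          exact hIH.2 blocks p hp0 (by omega)

-- first-hit characterisation of find? over a range
lemma find?_pyRange_first (f : Int → Bool) (a c i : Int) (ha : a ≤ i) (hi : i < c)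
    (hclean : ∀ t, a ≤ t → t < i → f t = false) (hf : f i = true) :
    (PySem.List.pyRange a c 1).find? f = some i := by
  have hn : (i - a).toNat = (i - a).toNat := rfl
  generalize hgen : (i - a).toNat = n at hn
  clear hn
  induction n generalizing a with
  | zero =>
    have : a = i := by omega
    subst this
    rw [PySem.List.pyRange_one_cons (by omega)]
    simp [List.find?, hf]
  | succ n ih =>
    have hai : a < i := by omega
    rw [PySem.List.pyRange_one_cons (by omega)]
    simp only [List.find?]
    rw [hclean a (le_refl a) hai]
    exact ih (a + 1) (by omega) (fun t ht1 ht2 => hclean t (by omega) ht2) (by omega)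

lemma find?_pyRange_none (f : Int → Bool) (a c : Int)
    (hclean : ∀ t, a ≤ t → t < c → f t = false) :
    (PySem.List.pyRange a c 1).find? f = none := by
  rw [List.find?_eq_none]
  intro x hx
  rw [PySem.List.mem_pyRange_one] at hx
  simp [hclean x hx.1 hx.2]

lemma startsIn_base (lines : List String) (b i : Int) (h : b ≤ i) :
    startsIn lines b i = [] := by
  unfold startsIn; rw [PySem.List.pyRange_one_eq_nil h]; rfl

lemma startsIn_step (lines : List String) (b i : Int) (h : i < b) :
    startsIn lines b i
      = if isPhaseStart (PySem.List.pyGetD lines i "") then i :: startsIn lines b (i + 1)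
        else startsIn lines b (i + 1) := by
  unfold startsIn
  rw [PySem.List.pyRange_one_cons h, List.filter_cons]

lemma mem_startsIn (lines : List String) (b i q : Int) (h : q ∈ startsIn lines b i) :
    i ≤ q ∧ q < b := by
  unfold startsIn at h
  have := List.mem_of_mem_filter h
  rwa [PySem.List.mem_pyRange_one] at this

lemma bmap_cons (lines : List String) (b : Int) (p : Int) (rest : List Int) :
    bmap lines b (p :: rest) = blockOf lines p (rest.headD b) :: bmap lines b rest := by
  cases rest <;> rfl

lemma headD_startsIn_gt (lines : List String) (b i : Int) (h : i < b) :
    i < (startsIn lines b (i + 1)).headD b := by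
  cases hS : startsIn lines b (i + 1) with
  | nil => simpa using h
  | cons q t =>
    have hq : q ∈ startsIn lines b (i + 1) := by rw [hS]; exact List.mem_cons_self
    have := mem_startsIn lines b (i + 1) q hq
    simp only [List.headD_cons]
    omega

-- B's zip-map equals the reference recursion
lemma specB_spec (lines : List String) (b : Int) :
    ∀ n (i : Int), (b - i).toNat = n → 0 ≤ i → i ≤ b →
      ((specGo lines b none i = bmap lines b (startsIn lines b i))
       ∧ (∀ p : Int, 0 ≤ p → p < i →
          (∀ t, p < t → t < i → isPhaseStart (PySem.List.pyGetD lines t "") = false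
              ∧ isPhaseEnd (PySem.List.pyGetD lines t "") = false) →
          specGo lines b (some p) i
            = blockOf lines p ((startsIn lines b i).headD b)
                :: bmap lines b (startsIn lines b i))) := by
  intro n
  induction n with
  | zero =>
    intro i hn h0 hib
    have hbi : b ≤ i := by omega
    rw [startsIn_base lines b i hbi]
    constructor
    · rw [specGo_none_base lines b i hbi]; rfl
    · intro p hp0 hpi hclean
      rw [specGo_some_base lines b p i hbi]
      have hieq : i = b := by omega
      subst hieq
      unfold blockOf
      rw [find?_pyRange_none _ _ _
        (fun t ht1 ht2 => (hclean t (by omega) (by simpa using ht2)).2)]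
      rfl
  | succ n ih =>
    intro i hn h0 hib
    have hlt : i < b := by omega
    have hIH := ih (i + 1) (by omega) (by omega) (by omega)
    constructor
    · rw [specGo_none_step lines b i hlt, startsIn_step lines b i hlt]
      by_cases hPS : isPhaseStart (PySem.List.pyGetD lines i "")
      · rw [if_pos hPS, if_pos hPS, bmap_cons]
        exact hIH.2 i h0 (by omega) (fun t ht1 ht2 => absurd ht2 (by omega))
      · rw [if_neg hPS, if_neg hPS]
        exact hIH.1
    · intro p hp0 hpi hclean
      rw [specGo_some_step lines b p i hlt, startsIn_step lines b i hlt]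
      have hcleanEM : ∀ t, p + 1 ≤ t → t < i →
          isPhaseEnd (PySem.List.pyGetD lines t "") = false := by
        intro t ht1 ht2
        exact Bool.eq_false_iff.2 fun hc =>
          absurd hc (by simpa using (hclean t (by omega) ht2).2)
      by_cases hPS : isPhaseStart (PySem.List.pyGetD lines i "")
      · have hblk : blockOf lines p i = PySem.List.slice lines (some p) (some i) := by
          unfold blockOf
          rw [find?_pyRange_none _ _ _ (fun t ht1 ht2 => hcleanEM t ht1 ht2)]
        rw [if_pos hPS, if_pos hPS, List.headD_cons, bmap_cons, hblk,
          hIH.2 i h0 (by omega) (fun t ht1 ht2 => absurd ht2 (by omega))]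
      · by_cases hEM : isPhaseEnd (PySem.List.pyGetD lines i "")
        · rw [if_neg hPS, if_pos hEM, if_neg hPS]
          have hq := headD_startsIn_gt lines b i hlt
          have hblk : blockOf lines p ((startsIn lines b (i + 1)).headD b)
              = PySem.List.slice lines (some p) (some (i + 1)) := by
            unfold blockOf
            rw [find?_pyRange_first _ _ _ i (by omega) hq hcleanEM hEM]
          rw [hblk, hIH.1]
        · rw [if_neg hPS, if_neg hEM, if_neg hPS]
          exact hIH.2 p hp0 (by omega) (fun t ht1 ht2 => by
            by_cases hti : t = i
            · subst hti; exact ⟨Bool.eq_false_iff.2 hPS, Bool.eq_false_iff.2 hEM⟩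
            · exact hclean t ht1 (by omega))

-- the marker scan: A's pair fold splits into two independent folds
lemma foldl_pair_split (l : List (Int × String)) (f g : String → Bool) :
    ∀ (x y : Int), l.foldl
      (fun (st : Int × Int) p =>
        let st1 := if f p.2 then (p.1, st.2) else st
        if g p.2 then (st1.1, p.1) else st1) (x, y)
      = (l.foldl (fun a p => if f p.2 then p.1 else a) x,
         l.foldl (fun a p => if g p.2 then p.1 else a) y) := by
  induction l with
  | nil => intro x y; rfl
  | cons hd tl ih =>
    intro x y
    simp only [List.foldl_cons]
    by_cases hf : f hd.2 <;> by_cases hg : g hd.2 <;> simp [hf, hg, ih]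

-- a last-match forward fold is a first-match backward scan
lemma foldl_last_eq_rfind (f : String → Bool) :
    ∀ (l : List (Int × String)) (a : Int), l.foldl (fun acc p => if f p.2 then p.1 else acc) a
      = (match l.reverse.find? (fun p => f p.2) with
         | some p => p.1
         | none => a) := by
  intro l
  induction l using List.reverseRecOn with
  | nil => intro a; rfl
  | append_singleton tl hd ih =>
    intro a
    rw [List.foldl_append, List.reverse_append]
    simp only [List.foldl_cons, List.foldl_nil, List.reverse_cons, List.reverse_nil,
      List.nil_append, List.cons_append, List.find?]
    by_cases hf : f hd.2
    · simp [hf]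
    · simp only [hf]
      exact ih a

lemma rlast_bounds (lines : List String) (needle : String)
    (h : rlastContaining lines needle ≠ -1) :
    0 ≤ rlastContaining lines needle ∧ rlastContaining lines needle < (lines.length : Int) := by
  cases hfind : (PySem.List.enumerate lines 0).reverse.find? (fun p => PySem.Str.isIn needle p.2) with
  | none => exfalso; apply h; unfold rlastContaining; rw [hfind]
  | some q =>
    unfold rlastContaining
    rw [hfind]
    have hmem : q ∈ (PySem.List.enumerate lines 0).reverse := List.mem_of_find?_eq_some hfind
    rw [List.mem_reverse] at hmem
    rw [PySem.List.mem_enumerate_iff] at hmem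
    obtain ⟨k, hk, rfl⟩ := hmem
    constructor <;> simp
    omega

-- A's single marker scan equals B's two backward scans
lemma markers_eq (lines : List String) :
    (PySem.List.enumerate lines 0).foldl
      (fun (st : Int × Int) p =>
        let st1 := if PySem.Str.isIn "Data concerning crystalline phases" p.2 then (p.1, st.2) else st
        if PySem.Str.isIn "} End of information about phases" p.2 then (st1.1, p.1) else st1)
      (-1, -1)
      = (rlastContaining lines "Data concerning crystalline phases",
         rlastContaining lines "} End of information about phases") := by
  rw [foldl_pair_split]
  unfold rlastContaining
  rw [foldl_last_eq_rfind, foldl_last_eq_rfind]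

-- ===== VERDICT (by name: the statement is the Claim_ definition above) =====
theorem extract_phase_blocks_py_spec : Claim_equal_extract_phase_blocks_py := by
  intro lines _dom
  unfold Spec_extract_phase_blocks_py extract_phase_blocks_py extract_phase_blocks_py_alt
  rw [markers_eq]
  by_cases hnil : rlastContaining lines "Data concerning crystalline phases" = -1
      ∨ rlastContaining lines "} End of information about phases" = -1
  · simp only [if_pos hnil]
  · simp only [if_neg hnil]
    rw [not_or] at hnil
    obtain ⟨hs0, hs1⟩ := rlast_bounds lines _ hnil.1
    obtain ⟨he0, he1⟩ := rlast_bounds lines _ hnil.2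
    set s := rlastContaining lines "Data concerning crystalline phases" with hsdef
    set e := rlastContaining lines "} End of information about phases" with hedef
    by_cases hle : s + 1 ≤ e
    · have hA := (foldA_spec lines e (by omega) (e - (s + 1)).toNat (s + 1) rfl (by omega)
        (by omega)).1 []
      have hB := (specB_spec lines e (e - (s + 1)).toNat (s + 1) rfl (by omega) (by omega)).1
      rw [List.nil_append] at hA
      rw [hA, hB]
      rfl
    · rw [PySem.List.pyRange_one_eq_nil (by omega)]
      simp [finishA]
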